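-- pv_equiv track=rewrite | github.com/aduerig/advent_of_code | 2023/13.py | rows_above
-- ===== SOURCE A (Python) =====
-- def rows_above(island):
--     answers = []
--     for y1 in range(len(island) - 1):
--         y2 = y1 + 1
--
--         bad = False
--         y1_iter = y1
--         y2_iter = y2
--         while y1_iter > -1 and y2_iter < len(island):
--             if island[y1_iter] != island[y2_iter]:
--                 bad = True
--                 break
--             y1_iter -= 1
--             y2_iter += 1
--         if not bad:
--             answers.append(y2)
--     return answers
-- ===== SOURCE B (Python) =====
-- def rows_above(island):
--     # Sieve over mismatched row pairs: a mirror line at i fails exactly when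
--     # some pair (a, b) with a + b == 2*i - 1 has island[a] != island[b], so we
--     # mark the odd sum a + b of every mismatched pair as bad and keep the
--     # centers whose sum 2*i - 1 was never marked.
--     n = len(island)
--     bad = set()
--     for b in range(n):
--         for a in range(b):
--             if (a + b) % 2 == 1 and island[a] != island[b]:
--                 bad.add(a + b)
--     return [i for i in range(1, n) if 2 * i - 1 not in bad]
-- ===== Notes on version B (the rewrite author's own statement) =====
-- stated objective: alternative
-- what changed: B does not expand two pointers from each candidate mirror line; it sieves once over all row pairs (a,b), marking the odd sum a+b of every mismatched pair in a set, and then keeps exactly the centers i whose pair-sum 2*i-1 was never marked (a mirror at i fails iff some pair with a+b=2*i-1 mismatches).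
import Mathlib
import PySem

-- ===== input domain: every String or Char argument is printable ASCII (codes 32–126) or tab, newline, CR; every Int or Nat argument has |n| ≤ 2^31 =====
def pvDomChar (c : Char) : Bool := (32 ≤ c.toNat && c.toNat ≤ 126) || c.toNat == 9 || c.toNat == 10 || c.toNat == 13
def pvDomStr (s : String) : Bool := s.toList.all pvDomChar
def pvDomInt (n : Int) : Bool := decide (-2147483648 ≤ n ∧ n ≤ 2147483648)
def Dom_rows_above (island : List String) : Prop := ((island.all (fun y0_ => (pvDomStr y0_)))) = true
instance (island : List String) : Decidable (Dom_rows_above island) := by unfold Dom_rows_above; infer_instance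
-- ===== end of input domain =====

-- B replaces A's per-center two-pointer expansion by a pair sieve: it marks the
-- odd sum a+b of every mismatched row pair (a,b) in one pass over all pairs and
-- keeps the centers i whose sum 2*i-1 was never marked (alternative algorithm,
-- not claimed faster).

-- ===== PORT A =====
-- the while loop of A: expands the two pointers, returns the final value of `bad`
def rows_above_bad (island : List String) (y1 y2 : Int) : Bool :=
  if h : y1 > -1 ∧ y2 < (island.length : Int) then
    if PySem.List.pyGet? island y1 ≠ PySem.List.pyGet? island y2 then true
    else rows_above_bad island (y1 - 1) (y2 + 1)
  else false
termination_by (y1 + 1).toNat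
decreasing_by omega

def rows_above (island : List String) : List Int :=
  (PySem.List.pyRange 0 ((island.length : Int) - 1)).foldl
    (fun answers y1 =>
      let y2 := y1 + 1
      let bad := rows_above_bad island y1 y2
      if !bad then answers ++ [y2] else answers) []

-- ===== PORT B =====
-- the sieve: `bad` after B's double loop over all pairs a < b
def rows_above_sieve (island : List String) : PySem.Set Int :=
  (PySem.List.pyRange 0 (island.length : Int)).foldl (fun bad b =>
    (PySem.List.pyRange 0 b).foldl (fun bad a =>
      if PySem.Int.mod (a + b) 2 = 1 ∧
          PySem.List.pyGet? island a ≠ PySem.List.pyGet? island b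
      then PySem.Set.add bad (a + b) else bad) bad) PySem.Set.empty

def rows_above_alt (island : List String) : List Int :=
  let bad := rows_above_sieve island
  (PySem.List.pyRange 1 (island.length : Int)).filter
    (fun i => !(PySem.Set.contains bad (2 * i - 1)))

-- ===== PRECONDITION & SPEC =====
def Spec_rows_above (island : List String) (out : List Int) : Prop := out = rows_above_alt island
instance (island : List String) (out : List Int) : Decidable (Spec_rows_above island out) := by unfold Spec_rows_above; infer_instance

-- ===== CLAIM (what is proved, stated in full; the proofs are below) =====
def Claim_equal_rows_above : Prop := ∀ (island : List String), Dom_rows_above island → Spec_rows_above island (rows_above island)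

-- ===== LEMMAS AND PROOFS =====

-- membership after the inner sieve loop: in the accumulator already, or added by
-- some element of the list
theorem mem_foldl_add {Q : Int → Prop} [DecidablePred Q] (g : Int → Int) :
    ∀ (l : List Int) (s : PySem.Set Int) (x : Int),
    (x ∈ l.foldl (fun s a => if Q a then PySem.Set.add s (g a) else s) s) ↔
      x ∈ s ∨ ∃ a ∈ l, Q a ∧ g a = x := by
  intro l
  induction l with
  | nil => intro s x; simp
  | cons a l ih =>
    intro s x
    simp only [List.foldl_cons]
    by_cases hq : Q a
    · rw [if_pos hq, ih]
      rw [PySem.Set.mem_add]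
      constructor
      · rintro (⟨h | h⟩ | ⟨b, hb, hQ, he⟩)
        · exact Or.inl h
        · exact Or.inr ⟨a, by simp, hq, h.symm⟩
        · exact Or.inr ⟨b, by simp [hb], hQ, he⟩
      · rintro (h | ⟨b, hb, hQ, he⟩)
        · exact Or.inl (Or.inl h)
        · rcases List.mem_cons.mp hb with rfl | hb
          · exact Or.inl (Or.inr he.symm)
          · exact Or.inr ⟨b, hb, hQ, he⟩
    · rw [if_neg hq, ih]
      constructor
      · rintro (h | ⟨b, hb, hQ, he⟩)
        · exact Or.inl h
        · exact Or.inr ⟨b, by simp [hb], hQ, he⟩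
      · rintro (h | ⟨b, hb, hQ, he⟩)
        · exact Or.inl h
        · rcases List.mem_cons.mp hb with rfl | hb
          · exact absurd hQ hq
          · exact Or.inr ⟨b, hb, hQ, he⟩

-- membership after the full double sieve loop
theorem mem_foldl_add2 {Q : Int → Int → Prop} [inst : ∀ a b, Decidable (Q a b)]
    (inner : Int → List Int) :
    ∀ (l : List Int) (s : PySem.Set Int) (x : Int),
    (x ∈ l.foldl (fun s b =>
        (inner b).foldl (fun s a => if Q a b then PySem.Set.add s (a + b) else s) s) s) ↔
      x ∈ s ∨ ∃ b ∈ l, ∃ a ∈ inner b, Q a b ∧ a + b = x := by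
  intro l
  induction l with
  | nil => intro s x; simp
  | cons b l ih =>
    intro s x
    simp only [List.foldl_cons]
    rw [ih, mem_foldl_add (fun a => a + b)]
    constructor
    · rintro (⟨h | ⟨a, ha, hQ, he⟩⟩ | ⟨b', hb', a, ha, hQ, he⟩)
      · exact Or.inl h
      · exact Or.inr ⟨b, by simp, a, ha, hQ, he⟩
      · exact Or.inr ⟨b', by simp [hb'], a, ha, hQ, he⟩
    · rintro (h | ⟨b', hb', a, ha, hQ, he⟩)
      · exact Or.inl (Or.inl h)
      · rcases List.mem_cons.mp hb' with rfl | hb'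
        · exact Or.inl (Or.inr ⟨a, ha, hQ, he⟩)
        · exact Or.inr ⟨b', hb', a, ha, hQ, he⟩

-- A's while loop returns true iff some mirrored pair of rows differs
theorem bad_iff (island : List String) : ∀ (a : Nat) (b : Nat),
    rows_above_bad island ((a : Int) - 1) (b : Int) = true ↔
      ∃ k : Nat, k < a ∧ b + k < island.length ∧ island[a - 1 - k]? ≠ island[b + k]? := by
  intro a
  induction a with
  | zero =>
    intro b
    rw [rows_above_bad]
    have hc : ¬ (((0 : Nat) : Int) - 1 > -1 ∧ (b : Int) < (island.length : Int)) := by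
      push Not; intro h; omega
    rw [dif_neg hc]
    constructor
    · intro h; exact absurd h (by simp)
    · rintro ⟨k, hk, -⟩; omega
  | succ a ih =>
    intro b
    by_cases hb : b < island.length
    · rw [rows_above_bad]
      have hc : ((a + 1 : Nat) : Int) - 1 > -1 ∧ (b : Int) < (island.length : Int) := by
        constructor
        · push_cast; omega
        · omega
      rw [dif_pos hc]
      have e1 : ((a + 1 : Nat) : Int) - 1 = ((a : Nat) : Int) := by push_cast; ring
      rw [e1]
      simp only [PySem.List.pyGet?_natCast]
      by_cases hne : island[a]? = island[b]?
      · rw [if_neg (by simp [hne])]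
        have e3 : ((b : Nat) : Int) + 1 = ((b + 1 : Nat) : Int) := by push_cast; ring
        rw [e3, ih (b + 1)]
        constructor
        · rintro ⟨k, hk, hlt, hneq⟩
          refine ⟨k + 1, by omega, by omega, ?_⟩
          have e4 : a + 1 - 1 - (k + 1) = a - 1 - k := by omega
          have e5 : b + (k + 1) = b + 1 + k := by omega
          rw [e4, e5]
          exact hneq
        · rintro ⟨k, hk, hlt, hneq⟩
          cases k with
          | zero =>
            exact absurd (by simpa using hne) (by simpa using hneq)
          | succ k =>
            refine ⟨k, by omega, by omega, ?_⟩
            have e4 : a + 1 - 1 - (k + 1) = a - 1 - k := by omega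
            have e5 : b + (k + 1) = b + 1 + k := by omega
            rw [e4, e5] at hneq
            exact hneq
      · rw [if_pos (by simp [hne])]
        constructor
        · intro _
          refine ⟨0, by omega, by omega, ?_⟩
          simpa using hne
        · intro _; rfl
    · rw [rows_above_bad]
      have hc : ¬ (((a + 1 : Nat) : Int) - 1 > -1 ∧ (b : Int) < (island.length : Int)) := by
        push Not; intro _; omega
      rw [dif_neg hc]
      constructor
      · intro h; exact absurd h (by simp)
      · rintro ⟨k, hk, hlt, -⟩; omega

-- B's sieve holds 2*i-1 iff some mirrored pair of rows around center i differs
theorem sieve_iff (island : List String) (i : Nat) (hi1 : 1 ≤ i)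
    (_hin : i < island.length) :
    ((2 * (i : Int) - 1) ∈ rows_above_sieve island) ↔
      ∃ k : Nat, k < i ∧ i + k < island.length ∧ island[i - 1 - k]? ≠ island[i + k]? := by
  unfold rows_above_sieve
  rw [mem_foldl_add2 (Q := fun a b => PySem.Int.mod (a + b) 2 = 1 ∧
      PySem.List.pyGet? island a ≠ PySem.List.pyGet? island b) (fun b => PySem.List.pyRange 0 b)]
  simp only [PySem.Set.empty, List.not_mem_nil, false_or]
  constructor
  · rintro ⟨b', hb', a', ha', ⟨-, hneq⟩, hsum⟩
    rw [PySem.List.mem_pyRange_one] at hb' ha'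
    -- b' ≥ i since a' < b' and a' + b' = 2 i - 1
    have hbi : (i : Int) ≤ b' := by omega
    refine ⟨(b' - (i : Int)).toNat, by omega, by omega, ?_⟩
    rw [PySem.List.pyGet?_of_nonneg island (show (0 : Int) ≤ a' by omega),
        PySem.List.pyGet?_of_nonneg island (show (0 : Int) ≤ b' by omega)] at hneq
    have ea : a'.toNat = i - 1 - (b' - (i : Int)).toNat := by omega
    have eb : b'.toNat = i + (b' - (i : Int)).toNat := by omega
    rw [ea, eb] at hneq
    exact hneq
  · rintro ⟨k, hk, hlt, hneq⟩
    refine ⟨((i + k : Nat) : Int), ?_, ((i - 1 - k : Nat) : Int), ?_, ⟨?_, ?_⟩, ?_⟩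
    · rw [PySem.List.mem_pyRange_one]
      constructor
      · positivity
      · push_cast; omega
    · rw [PySem.List.mem_pyRange_one]
      constructor
      · positivity
      · push_cast; omega
    · have e : ((i - 1 - k : Nat) : Int) + ((i + k : Nat) : Int) = 2 * (i : Int) - 1 := by
        push_cast; omega
      rw [e, PySem.Int.mod_eq_emod_of_pos (by norm_num)]
      omega
    · rw [PySem.List.pyGet?_natCast, PySem.List.pyGet?_natCast]
      exact hneq
    · push_cast; omega

-- ===== VERDICT (by name: the statement is the Claim_ definition above) =====
theorem rows_above_spec : Claim_equal_rows_above := by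
  intro island _
  unfold Spec_rows_above
  -- A as filter-then-map over range(len-1)
  have hA : rows_above island =
      ((PySem.List.pyRange 0 ((island.length : Int) - 1)).filter
        (fun y1 => !rows_above_bad island y1 (y1 + 1))).map (fun y1 => y1 + 1) := by
    unfold rows_above
    rw [show (fun (answers : List Int) (y1 : Int) =>
        let y2 := y1 + 1
        let bad := rows_above_bad island y1 y2
        if !bad then answers ++ [y2] else answers) =
      (fun (answers : List Int) (y1 : Int) =>
        if (fun y1 => !rows_above_bad island y1 (y1 + 1)) y1 = true
        then answers ++ [(fun y1 => y1 + 1) y1] else answers) from rfl]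
    rw [PySem.List.foldl_append_if]
    simp
  rw [hA]
  unfold rows_above_alt
  show _ = (PySem.List.pyRange 1 (island.length : Int)).filter
      (fun i => !(PySem.Set.contains (rows_above_sieve island) (2 * i - 1)))
  -- both index lists are the same map over List.range
  rw [PySem.List.pyRange_one 0 ((island.length : Int) - 1),
      PySem.List.pyRange_one 1 (island.length : Int)]
  have hlen : (((island.length : Int)) - 1 - 0).toNat = ((island.length : Int) - 1).toNat := by
    omega
  rw [hlen]
  have hrange : List.map (fun k : Nat => (1 : Int) + (k : Int))
        (List.range (((island.length : Int) - 1).toNat)) =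
      List.map ((fun y1 : Int => y1 + 1) ∘ (fun k : Nat => (0 : Int) + (k : Int)))
        (List.range (((island.length : Int) - 1).toNat)) := by
    apply List.map_congr_left
    intro k _
    show (1 : Int) + (k : Int) = ((0 : Int) + (k : Int)) + 1
    ring
  rw [List.filter_map, hrange, List.filter_map, List.map_map]
  congr 1
  apply List.filter_congr
  intro k hk
  rw [List.mem_range] at hk
  have hk' : k + 1 < island.length := by omega
  simp only [Function.comp]
  -- pointwise: A's expansion test at y1 = k equals B's sieve test at i = k+1
  have e1 : (0 : Int) + (k : Int) = ((k + 1 : Nat) : Int) - 1 := by push_cast; ring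
  have e2 : (0 : Int) + (k : Int) + 1 = ((k + 1 : Nat) : Int) := by push_cast; ring
  have e3 : 2 * ((0 : Int) + (k : Int) + 1) - 1 = 2 * ((k + 1 : Nat) : Int) - 1 := by
    push_cast; ring
  rw [e3]
  have hbad := bad_iff island (k + 1) (k + 1)
  have hsieve := sieve_iff island (k + 1) (by omega) (by omega)
  have hmem : PySem.Set.contains (rows_above_sieve island) (2 * ((k + 1 : Nat) : Int) - 1)
      = rows_above_bad island ((0 : Int) + (k : Int)) ((0 : Int) + (k : Int) + 1) := by
    rw [e2, e1]
    simp only [PySem.Set.contains]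
    cases hcase : rows_above_bad island (((k + 1 : Nat) : Int) - 1) ((k + 1 : Nat) : Int) with
    | true =>
      have hm := hsieve.mpr (hbad.mp hcase)
      simpa using hm
    | false =>
      have hnm : (2 * ((k + 1 : Nat) : Int) - 1) ∉ rows_above_sieve island := by
        intro hm
        have ht := hbad.mpr (hsieve.mp hm)
        rw [hcase] at ht
        exact Bool.false_ne_true ht
      simpa using hnm
  rw [hmem]
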